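-- pv_equiv track=rewrite | github.com/SamuelS00/Trybe-Exerc-cio | Mod04-CienciaDaComputacao/Bloco36-Estrutura-de-Dados/Dia02-Bloco36/exercicios/ex1.py | get_time_server_instability
-- ===== SOURCE A (Python) =====
-- def get_time_server_instability(arr):
--     counters = []
--     counter = 0
--
--     # A complexidade desse laço é O(n)
--     # pois percorre por toda a entrada no laço
--     for i in arr:
--         if i == 1:
--             counter += 1
--         else:
--             counters.append(counter)
--             counter = 0
--
--     counters.sort(reverse=True)
--     # A complexidade do algoritmo é fatorial O(n!).
--     # ele é O(1) no melhor caso: se a lista estiver em ordem, ele termina em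
--     # apenas 1 ciclo.
--
--     return counters[0]
-- ===== SOURCE B (Python) =====
-- def get_time_server_instability(arr):
--     # positions of the elements that terminate a 1-run
--     breaks = [i for i, x in enumerate(arr) if x != 1]
--     best = 0
--     prev = -1
--     for i in breaks:
--         if i - prev - 1 > best:
--             best = i - prev - 1
--         prev = i
--     return best
-- ===== Notes on version B (the rewrite author's own statement) =====
-- stated objective: alternative
-- what changed: Instead of counting run lengths and sorting them descending to take the head, B collects the indices of the non-1 break elements and returns the maximum gap between consecutive break positions (prev initialised to -1), which equals the longest terminated 1-run.
import Mathlib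
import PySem

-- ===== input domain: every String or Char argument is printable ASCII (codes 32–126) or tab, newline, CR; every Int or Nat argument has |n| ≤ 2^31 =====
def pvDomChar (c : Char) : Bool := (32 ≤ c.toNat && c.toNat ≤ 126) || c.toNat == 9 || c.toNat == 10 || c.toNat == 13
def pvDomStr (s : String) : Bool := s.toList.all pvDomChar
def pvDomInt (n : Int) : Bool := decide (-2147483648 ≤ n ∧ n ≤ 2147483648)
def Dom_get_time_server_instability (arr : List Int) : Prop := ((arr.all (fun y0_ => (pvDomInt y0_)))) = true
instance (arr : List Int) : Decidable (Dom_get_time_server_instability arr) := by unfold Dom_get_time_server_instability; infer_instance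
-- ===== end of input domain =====

-- B replaces A's collect-run-lengths + sort(reverse=True) + [0] by a break-position scan: it lists the indices of the non-1 elements and returns the maximum gap between consecutive break positions (alternative algorithm; no measured speed-up claimed).


-- ===== PORT A =====
-- loop building the list of terminated run lengths, then sort(reverse=True), then counters[0]
-- (counters[0] raises IndexError when counters = []; exactly those inputs are excluded by Pre_,
--  so the .getD 0 default is never reached inside Pre_)
def get_time_server_instability (arr : List Int) : Int :=
  let st := arr.foldl
    (fun (s : List Int × Int) i => if i = 1 then (s.1, s.2 + 1) else (s.1 ++ [s.2], 0))
    ([], 0)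
  let counters := PySem.List.sorted st.1 (fun x => x) true
  (PySem.List.pyGet? counters 0).getD 0

-- ===== PORT B =====
-- breaks = indices of the non-1 elements (list comprehension over enumerate);
-- then a scan over breaks keeping (best, prev) and the max gap i - prev - 1
def get_time_server_instability_alt (arr : List Int) : Int :=
  let breaks := ((PySem.List.enumerate arr 0).filter (fun p => p.2 ≠ 1)).map (fun p => p.1)
  (breaks.foldl
    (fun (s : Int × Int) i => if i - s.2 - 1 > s.1 then (i - s.2 - 1, i) else (s.1, i))
    (0, -1)).1

-- ===== PRECONDITION & SPEC =====
-- Pre_ excludes exactly the inputs on which A raises IndexError: arrays whose every element is 1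
-- (then no run is ever terminated and counters is empty).
def Pre_get_time_server_instability (arr : List Int) : Prop := ∃ i ∈ arr, i ≠ 1
instance (arr : List Int) : Decidable (Pre_get_time_server_instability arr) := by unfold Pre_get_time_server_instability; infer_instance
def pvWitness_get_time_server_instability : List Int := [1, 1, 0, 1]

def Spec_get_time_server_instability (arr : List Int) (out : Int) : Prop := out = get_time_server_instability_alt arr
instance (arr : List Int) (out : Int) : Decidable (Spec_get_time_server_instability arr out) := by unfold Spec_get_time_server_instability; infer_instance

-- ===== CLAIM (what is proved, stated in full; the proofs are below) =====
def Claim_equal_get_time_server_instability : Prop := ∀ (arr : List Int), Dom_get_time_server_instability arr → Pre_get_time_server_instability arr → Spec_get_time_server_instability arr (get_time_server_instability arr)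

-- ===== LEMMAS AND PROOFS =====

-- the list of terminated 1-run lengths of arr, given current counter c
def pvRuns (arr : List Int) (c : Int) : List Int :=
  match arr with
  | [] => []
  | i :: t => if i = 1 then pvRuns t (c + 1) else c :: pvRuns t 0

-- A's loop computes cs ++ pvRuns arr c
lemma pv_A_loop : ∀ (arr cs : List Int) (c : Int),
    (arr.foldl (fun (s : List Int × Int) i => if i = 1 then (s.1, s.2 + 1) else (s.1 ++ [s.2], 0))
      (cs, c)).1 = cs ++ pvRuns arr c := by
  intro arr
  induction arr with
  | nil => intro cs c; simp [pvRuns]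
  | cons i t ih =>
    intro cs c
    by_cases hi : i = 1
    · simp only [List.foldl_cons, hi, pvRuns]
      exact ih cs (c + 1)
    · simp only [List.foldl_cons, if_neg hi, pvRuns]
      rw [ih (cs ++ [c]) 0]
      simp

-- B's scan over the break indices computes the foldl-max of pvRuns
lemma pv_B_loop : ∀ (arr : List Int) (k prev best : Int),
    ((((PySem.List.enumerate arr k).filter (fun p => p.2 ≠ 1)).map (fun p => p.1)).foldl
      (fun (s : Int × Int) i => if i - s.2 - 1 > s.1 then (i - s.2 - 1, i) else (s.1, i))
      (best, prev)).1
    = (pvRuns arr (k - prev - 1)).foldl max best := by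
  intro arr
  induction arr with
  | nil => intro k prev best; simp [PySem.List.enumerate_nil, pvRuns]
  | cons i t ih =>
    intro k prev best
    rw [PySem.List.enumerate_cons]
    by_cases hi : i = 1
    · have h1 : ((k, i) :: PySem.List.enumerate t (k + 1)).filter (fun p => p.2 ≠ 1)
          = (PySem.List.enumerate t (k + 1)).filter (fun p => p.2 ≠ 1) := by
        simp [hi]
      rw [h1, pvRuns, if_pos hi]
      have := ih (k + 1) prev best
      rw [show k + 1 - prev - 1 = k - prev - 1 + 1 by ring] at this
      exact this
    · have h1 : ((k, i) :: PySem.List.enumerate t (k + 1)).filter (fun p => p.2 ≠ 1)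
          = (k, i) :: (PySem.List.enumerate t (k + 1)).filter (fun p => p.2 ≠ 1) := by
        simp [hi]
      rw [h1, List.map_cons, List.foldl_cons]
      have hstep : (if k - prev - 1 > best then (k - prev - 1, k) else (best, k))
          = (max best (k - prev - 1), k) := by
        by_cases h : k - prev - 1 > best
        · rw [if_pos h]; congr 1; omega
        · rw [if_neg h]; congr 1; omega
      rw [hstep, ih (k + 1) k (max best (k - prev - 1)), pvRuns, if_neg hi, List.foldl_cons]
      congr 2
      omega

-- every entry of pvRuns is nonnegative when the counter is
lemma pv_runs_nonneg : ∀ (arr : List Int) (c : Int), 0 ≤ c →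
    ∀ x ∈ pvRuns arr c, 0 ≤ x := by
  intro arr
  induction arr with
  | nil => intro c _ x hx; simp [pvRuns] at hx
  | cons i t ih =>
    intro c hc x hx
    by_cases hi : i = 1
    · rw [pvRuns, if_pos hi] at hx
      exact ih (c + 1) (by omega) x hx
    · rw [pvRuns, if_neg hi] at hx
      rcases List.mem_cons.mp hx with rfl | hx
      · exact hc
      · exact ih 0 le_rfl x hx

-- pvRuns is nonempty when some element ≠ 1
lemma pv_runs_nonempty : ∀ (arr : List Int) (c : Int),
    (∃ i ∈ arr, i ≠ 1) → pvRuns arr c ≠ [] := by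
  intro arr
  induction arr with
  | nil =>
    intro c h
    rcases h with ⟨i, hi, _⟩
    exact absurd hi (List.not_mem_nil)
  | cons i t ih =>
    intro c h
    by_cases hi : i = 1
    · rw [pvRuns, if_pos hi]
      refine ih (c + 1) ?_
      rcases h with ⟨j, hj, hne⟩
      rcases List.mem_cons.mp hj with rfl | hj
      · exact absurd hi hne
      · exact ⟨j, hj, hne⟩
    · rw [pvRuns, if_neg hi]
      simp

lemma pv_foldl_max_const : ∀ (t : List Int) (m : Int), (∀ y ∈ t, y ≤ m) → t.foldl max m = m := by
  intro t
  induction t with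
  | nil => intro m _; rfl
  | cons x s ih =>
    intro m h
    simp only [List.foldl_cons]
    have hx : x ≤ m := h x (List.mem_cons_self)
    rw [max_eq_left hx]
    exact ih m (fun y hy => h y (List.mem_cons_of_mem _ hy))

lemma pv_foldl_max_eq : ∀ (cs : List Int) (a m : Int),
    a ≤ m → m ∈ cs → (∀ y ∈ cs, y ≤ m) → cs.foldl max a = m := by
  intro cs
  induction cs with
  | nil => intro a m _ hm _; exact absurd hm (List.not_mem_nil)
  | cons x t ih =>
    intro a m ha hm hle
    simp only [List.foldl_cons]
    by_cases hmt : m ∈ t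
    · exact ih (max a x) m (max_le ha (hle x List.mem_cons_self)) hmt
        (fun y hy => hle y (List.mem_cons_of_mem _ hy))
    · have hx : x = m := by
        rcases List.mem_cons.mp hm with h | h
        · exact h.symm
        · exact absurd h hmt
      subst hx
      rw [max_eq_right ha]
      exact pv_foldl_max_const t x (fun y hy => hle y (List.mem_cons_of_mem _ hy))

-- head of sorted(cs, reverse=True) equals foldl max 0 for nonempty cs of nonnegatives
lemma pv_head_sorted_rev (cs : List Int) (hne : cs ≠ []) (hnn : ∀ x ∈ cs, 0 ≤ x) :
    (PySem.List.pyGet? (PySem.List.sorted cs (fun x => x) true) 0).getD 0 = cs.foldl max 0 := by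
  obtain ⟨m, t, hst⟩ : ∃ m t, PySem.List.sorted cs (fun x => x) true = m :: t := by
    rcases hs : PySem.List.sorted cs (fun x => x) true with _ | ⟨m, t⟩
    · exact absurd ((PySem.List.sorted_eq_nil_iff cs (fun x => x) true).mp hs) hne
    · exact ⟨m, t, rfl⟩
  rw [hst]
  have hget : (PySem.List.pyGet? (m :: t) (0 : Int)).getD 0 = m := by
    simp [PySem.List.pyGet?, PySem.List.pyIdx?]
  rw [hget]
  have hmem : m ∈ cs := by
    have := PySem.List.mem_sorted cs (fun x => x) true m
    rw [hst] at this
    exact this.mp List.mem_cons_self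
  have hge : ∀ y ∈ cs, y ≤ m := PySem.List.key_head_sorted_rev_ge cs (fun x => x) hst
  exact (pv_foldl_max_eq cs 0 m (hnn m hmem) hmem hge).symm

theorem get_time_server_instability_spec : Claim_equal_get_time_server_instability := by
  intro arr _ hpre
  unfold Spec_get_time_server_instability get_time_server_instability get_time_server_instability_alt
  simp only []
  rw [pv_A_loop arr [] 0, List.nil_append]
  rw [pv_head_sorted_rev _ (pv_runs_nonempty arr 0 hpre) (pv_runs_nonneg arr 0 le_rfl)]
  have hB := pv_B_loop arr 0 (-1) 0
  rw [hB]
  norm_num
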